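-- pv_equiv track=rewrite | github.com/Hdofsksu223/TBAPP | tbDB.py | count_consecutive_losses
-- ===== SOURCE A (Python) =====
-- def count_consecutive_losses(rows):
--     """Count consecutive rows with bet_status=2"""
--     count = 0
--     for i in range(len(rows) - 1):
--         current = rows[i]['bet_status']
--         next_row = rows[i+1]['bet_status']
--         if current == 2 and next_row == 2:
--             count += 1
--     return count
-- ===== SOURCE B (Python) =====
-- def count_consecutive_losses(rows):
--     """Count consecutive rows with bet_status=2 (sum of run_length-1 over maximal runs of status 2)."""
--     if len(rows) < 2:
--         return 0
--     total = 0
--     run = 0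
--     for r in rows:
--         if r['bet_status'] == 2:
--             run += 1
--         else:
--             if run > 1:
--                 total += run - 1
--             run = 0
--     if run > 1:
--         total += run - 1
--     return total
-- ===== Notes on version B (the rewrite author's own statement) =====
-- stated objective: alternative
-- what changed: B makes a single pass over the rows tracking the length of the current run of status-2 rows and sums (run_length - 1) over maximal runs, instead of A's index loop testing each adjacent pair rows[i]/rows[i+1].
import Mathlib
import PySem

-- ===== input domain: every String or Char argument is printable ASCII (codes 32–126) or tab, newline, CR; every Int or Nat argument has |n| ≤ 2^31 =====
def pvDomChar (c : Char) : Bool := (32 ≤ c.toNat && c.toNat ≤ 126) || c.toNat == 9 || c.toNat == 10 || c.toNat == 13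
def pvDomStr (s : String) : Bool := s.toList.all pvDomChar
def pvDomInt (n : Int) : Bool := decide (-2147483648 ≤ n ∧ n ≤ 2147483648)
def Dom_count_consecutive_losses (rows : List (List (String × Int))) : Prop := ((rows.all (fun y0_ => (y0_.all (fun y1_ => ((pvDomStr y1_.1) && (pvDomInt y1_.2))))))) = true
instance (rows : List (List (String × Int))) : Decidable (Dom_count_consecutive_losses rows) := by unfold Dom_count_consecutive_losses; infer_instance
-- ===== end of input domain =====

-- B replaces A's adjacent-index loop by a single run-tracking pass summing (run_length - 1) over maximal runs of status-2 rows (objective: alternative).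

-- ===== PORT A =====
def count_consecutive_losses (rows : List (List (String × Int))) : Int :=
  (PySem.List.pyRange 0 ((rows.length : Int) - 1) 1).foldl (fun count i =>
    let current := PySem.Dict.getD (PySem.Dict.mk (PySem.List.pyGetD rows i [])) "bet_status" 0
    let next_row := PySem.Dict.getD (PySem.Dict.mk (PySem.List.pyGetD rows (i + 1) [])) "bet_status" 0
    if current = 2 ∧ next_row = 2 then count + 1 else count) 0

-- ===== PORT B =====
def count_consecutive_losses_alt (rows : List (List (String × Int))) : Int :=
  if (rows.length : Int) < 2 then 0
  else
    let s := rows.foldl (fun (st : Int × Int) r =>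
      if PySem.Dict.getD (PySem.Dict.mk r) "bet_status" 0 = 2 then (st.1, st.2 + 1)
      else if st.2 > 1 then (st.1 + st.2 - 1, 0) else (st.1, 0)) (0, 0)
    if s.2 > 1 then s.1 + s.2 - 1 else s.1

-- ===== PRECONDITION & SPEC =====
-- Pre_ excludes exactly the inputs where the Python raises KeyError: some row
-- lacks the key "bet_status" while there are at least two rows (then A reads
-- every row's 'bet_status'); with at most one row neither program reads a row.
def Pre_count_consecutive_losses (rows : List (List (String × Int))) : Prop :=
  rows.length ≤ 1 ∨ ∀ r ∈ rows, "bet_status" ∈ r.map Prod.fst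
instance (rows : List (List (String × Int))) : Decidable (Pre_count_consecutive_losses rows) := by unfold Pre_count_consecutive_losses; infer_instance

def pvWitness_count_consecutive_losses : (List (List (String × Int))) :=
  [[("bet_status", 2)], [("bet_status", 2)], [("bet_status", 1)]]

def Spec_count_consecutive_losses (rows : List (List (String × Int))) (out : Int) : Prop := out = count_consecutive_losses_alt rows
instance (rows : List (List (String × Int))) (out : Int) : Decidable (Spec_count_consecutive_losses rows out) := by unfold Spec_count_consecutive_losses; infer_instance

-- ===== CLAIM (what is proved, stated in full; the proofs are below) =====
def Claim_equal_count_consecutive_losses : Prop := ∀ (rows : List (List (String × Int))), Dom_count_consecutive_losses rows → Pre_count_consecutive_losses rows → Spec_count_consecutive_losses rows (count_consecutive_losses rows)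

-- ===== LEMMAS AND PROOFS =====

/-- the status value both ports read from a row -/
def stOf (r : List (String × Int)) : Int := PySem.Dict.getD (PySem.Dict.mk r) "bet_status" 0

/-- adjacent-pair count of a status list: reference form both ports are reduced to -/
def pairCount : List Int → Int
  | a :: b :: t => (if a = 2 ∧ b = 2 then 1 else 0) + pairCount (b :: t)
  | _ => 0

/-- pair count given whether the previous element was 2 -/
def pairB : Bool → List Int → Int
  | _, [] => 0
  | p, x :: l => (if p ∧ x = 2 then 1 else 0) + pairB (decide (x = 2)) l

/-- B's fold step, on statuses -/
def gStep (s : Int × Int) (x : Int) : Int × Int :=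
  if x = 2 then (s.1, s.2 + 1) else if s.2 > 1 then (s.1 + s.2 - 1, 0) else (s.1, 0)

/-- B's final adjustment -/
def finish (s : Int × Int) : Int := if s.2 > 1 then s.1 + s.2 - 1 else s.1

theorem pairB_eq_pairCount (l : List Int) : ∀ a, pairB (decide (a = 2)) l = pairCount (a :: l) := by
  induction l with
  | nil => intro a; simp [pairB, pairCount]
  | cons x u ih => intro a; simp [pairB, pairCount, ih x]

theorem pairB_false_eq_pairCount (l : List Int) :
    pairB false l = pairCount l := by
  cases l with
  | nil => rfl
  | cons a t => simp [pairB, pairB_eq_pairCount t a]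

/-- countP over the index range equals pairCount of the mapped statuses -/
theorem countP_range_eq_pairCount (rows : List (List (String × Int))) :
    ((List.range (rows.length - 1)).countP
      (fun k => decide (stOf (rows.getD k []) = 2 ∧ stOf (rows.getD (k + 1) []) = 2)) : Int)
      = pairCount (rows.map stOf) := by
  induction rows with
  | nil => simp [pairCount]
  | cons a t ih =>
    cases t with
    | nil => simp [pairCount]
    | cons b u =>
      have h1 : (a :: b :: u).length - 1 = u.length + 1 := by simp
      rw [h1, List.range_succ_eq_map, List.countP_cons, List.countP_map]
      have h2 : ((fun k => decide (stOf ((a :: b :: u).getD k []) = 2 ∧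
              stOf ((a :: b :: u).getD (k + 1) []) = 2)) ∘ Nat.succ)
          = (fun k => decide (stOf ((b :: u).getD k []) = 2 ∧
              stOf ((b :: u).getD (k + 1) []) = 2)) := by
        funext k
        rfl
      rw [h2]
      have h3 : ((b :: u).length - 1) = u.length := by simp
      rw [h3] at ih
      push_cast
      rw [ih]
      simp only [List.map_cons, pairCount, List.getD_cons_zero, List.getD_cons_succ]
      split_ifs with hc hd hd <;> simp_all <;> omega

/-- the run-tracking fold invariant -/
theorem foldB_invariant (l : List Int) (t r : Int) (hr : 0 ≤ r) :
    finish (l.foldl gStep (t, r))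
      = (if 1 < r then t + r - 1 else t) + pairB (decide (1 ≤ r)) l := by
  induction l generalizing t r with
  | nil => simp [finish, pairB]
  | cons x l ih =>
    by_cases hx : x = 2
    · subst hx
      rw [List.foldl_cons, show gStep (t, r) 2 = (t, r + 1) from by simp [gStep],
        ih t (r + 1) (by omega)]
      have hd : decide ((1:Int) ≤ r + 1) = true := decide_eq_true (by omega)
      simp only [pairB, hd, decide_true, and_true, decide_eq_true_eq]
      split_ifs <;> omega
    · rw [List.foldl_cons, show gStep (t, r) x = if r > 1 then (t + r - 1, 0) else (t, 0) from by
        simp [gStep, hx]]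
      by_cases h1 : r > 1
      · rw [if_pos h1, ih (t + r - 1) 0 le_rfl]
        simp [pairB, hx]
        omega
      · rw [if_neg h1, ih t 0 le_rfl]
        simp [pairB, hx]
        omega

theorem a_eq_pairCount (rows : List (List (String × Int))) :
    count_consecutive_losses rows = pairCount (rows.map stOf) := by
  unfold count_consecutive_losses
  rw [PySem.List.pyRange_one, List.foldl_map]
  have hb : (fun (count : Int) (k : Nat) =>
        let current := PySem.Dict.getD (PySem.Dict.mk (PySem.List.pyGetD rows (0 + (k : Int)) [])) "bet_status" 0
        let next_row := PySem.Dict.getD (PySem.Dict.mk (PySem.List.pyGetD rows ((0 + (k : Int)) + 1) [])) "bet_status" 0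
        if current = 2 ∧ next_row = 2 then count + 1 else count)
      = (fun count k => if (fun k => decide (stOf (rows.getD k []) = 2 ∧
          stOf (rows.getD (k + 1) []) = 2)) k = true then count + 1 else count) := by
    funext count k
    have h1 : ((k : Int) + 1) = ((k + 1 : Nat) : Int) := by push_cast; ring
    simp only [zero_add, h1, PySem.List.pyGetD_natCast, stOf, decide_eq_true_eq]
  rw [hb, PySem.List.foldl_count_if, zero_add]
  have hn : (((rows.length : Int) - 1 - 0).toNat) = rows.length - 1 := by omega
  rw [hn, countP_range_eq_pairCount]

theorem alt_eq_pairCount (rows : List (List (String × Int))) :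
    count_consecutive_losses_alt rows = pairCount (rows.map stOf) := by
  unfold count_consecutive_losses_alt
  by_cases h : (rows.length : Int) < 2
  · rw [if_pos h]
    match rows, h with
    | [], _ => rfl
    | [a], _ => rfl
    | a :: b :: u, h => simp at h; omega
  · rw [if_neg h]
    have hf : rows.foldl (fun (st : Int × Int) r =>
        if PySem.Dict.getD (PySem.Dict.mk r) "bet_status" 0 = 2 then (st.1, st.2 + 1)
        else if st.2 > 1 then (st.1 + st.2 - 1, 0) else (st.1, 0)) (0, 0)
        = (rows.map stOf).foldl gStep (0, 0) := by
      rw [List.foldl_map]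
      rfl
    show finish (rows.foldl _ (0, 0)) = _
    rw [hf, foldB_invariant _ 0 0 le_rfl]
    simp only [show ¬ (1 < (0:Int)) from by omega, if_false, show decide (1 ≤ (0:Int)) = false from by decide]
    rw [pairB_false_eq_pairCount, zero_add]

-- ===== VERDICT (by name: the statement is the Claim_ definition above) =====
theorem count_consecutive_losses_spec : Claim_equal_count_consecutive_losses := by
  intro rows _ _
  unfold Spec_count_consecutive_losses
  rw [a_eq_pairCount, alt_eq_pairCount]
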